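-- pv_equiv track=rewrite | github.com/MichaelStorms11/Modified-Cellular-Life-Simulator | MCL_Simulator.py | process
-- ===== SOURCE A (Python) =====
-- import copy
--
-- def process(threads):   # Function that processes are mapped to.
--     even = [2,4,6]      # List of even numbers to compare neighbors to.
--     prime = [2,3,5,7]   # List of prime numbers to compare neighbors to.
--     newMatrix = copy.deepcopy(threads)          # Copy input matrix.
--     for x in range(len(threads)):
--         row = list(threads[x])                  # Create list of input line from string.
--         for y in range(len(row)):               # Iterate through matrix columns.
--                 neighbors = 0                   # Count of neighbors set to 0.
--                 if x < len(threads) and threads[x - 1][y] == '+':        # check for above neighbor.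
--                     neighbors += 1
--                 if y < len(row) and threads[x][y - 1] == '+':            # Check for left neighbor.
--                     neighbors += 1
--                 if x < len(threads) and y < len(row) and threads[x - 1][y - 1] == '+':  # Check For top left neighbor.
--                     neighbors += 1
--                 if x < len(threads) - 1 and threads[x + 1][y] == '+':                   # Check for below neighbor.
--                     neighbors += 1
--                 elif x == len(threads) - 1 and threads[0][y] == '+':                    # Check for below wrapped neighbor.
--                     neighbors += 1
--                 if y < len(row) - 1 and threads[x][y + 1] == '+':                       # Check for right neighbor.
--                     neighbors += 1
--                 elif y == len(row) - 1 and threads[x][0] == '+':                        # Check for right wrapped neighbor.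
--                     neighbors += 1
--                 if x < len(threads) - 1 and y < len(row) - 1 and threads[x + 1][y + 1] == '+':      # Check for bottom right neighbor.
--                     neighbors += 1
--                 elif x < len(threads) - 1 and y == len(row) - 1 and threads[x+1][0] == '+':         # Check for bottom right neighbor on right side of matrix.
--                     neighbors += 1
--                 elif x == len(threads) - 1 and y < len(row) - 1 and threads[0][y + 1] == '+':       # Check for bottom right wrapped neighbor on bottom side of matrix.
--                     neighbors += 1
--                 elif x == len(threads) - 1 and y == len(row) - 1 and threads[0][0] == '+':          # Check for bottom right wrapped neighbor in bottom right corner.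
--                     neighbors += 1
--                 if x < len(threads) - 1 and y < len(row) and threads[x + 1][y - 1] == '+':          # Check for Bottom left neighbor.
--                     neighbors += 1
--                 elif x == len(threads) - 1 and y < len(row) and threads[0][y - 1] == '+':           # Check for bottom left wrapped neighbor on bottom of matrix.
--                     neighbors += 1
--                 if x < len(threads) and y < len(row) - 1 and threads[x - 1][y + 1] == '+':          # Check for top right neighbor.
--                     neighbors += 1
--                 elif x < len(threads) and y == len(row) - 1 and threads[x - 1][0] == '+':           # Check for top right neighbor on right side of matrix.
--                     neighbors += 1
--                 if '+' in threads[x][y]:    # Case to change live cell depending on neighbors.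
--                     if neighbors in even:
--                         row[y] = '+'
--                     else:
--                         row[y] = '-'
--                 elif '-' in threads[x][y]:  # Case to change dead cell depending on neighbors.
--                     if neighbors in prime:
--                         row[y] = '+'
--                     else:
--                         row[y] = '-'
--         temp = ''.join(row) # Combine list into string.
--         newMatrix[x] = temp # Assign new string to temp matrix.
--     realResults = []
--     for z in range(len(newMatrix)):         # Doesn't append boundaries for row above and row below the matrix being edited.
--         if(z > 0 and z < len(newMatrix)-1):
--             realResults.append(newMatrix[z])
--     return realResults
-- ===== SOURCE B (Python) =====
-- def process(threads):
--     # Separable convolution: precompute horizontal triple-sums per row, then each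
--     # cell's neighbor count is three stacked triple-sums minus the cell itself.
--     n = len(threads)
--     grid = [[1 if c == '+' else 0 for c in row] for row in threads]
--     horiz = []
--     for b in grid:
--         m = len(b)
--         horiz.append([b[y - 1] + b[y] + b[(y + 1) % m] for y in range(m)])
--     out = []
--     for x in range(n):
--         row = threads[x]
--         m = len(row)
--         new = []
--         for y in range(m):
--             cnt = horiz[x - 1][y] + horiz[x][y] + horiz[(x + 1) % n][y] - grid[x][y]
--             c = row[y]
--             if c == '+':
--                 new.append('+' if cnt in (2, 4, 6) else '-')
--             elif c == '-':
--                 new.append('+' if cnt in (2, 3, 5, 7) else '-')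
--             else:
--                 new.append(c)
--         out.append(''.join(new))
--     return out[1:-1]
-- ===== Notes on version B (the rewrite author's own statement) =====
-- stated objective: alternative
-- what changed: Replaces A's per-cell fourteen-branch 8-neighbor scan by a staged separable convolution: a first pass precomputes, for every row, the cyclic horizontal triple-sum of live cells, and a second pass gets each cell's neighbor count as the sum of three stacked triple-sums minus the cell itself; rows are built directly and trimmed with a [1:-1] slice.
import Mathlib
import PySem

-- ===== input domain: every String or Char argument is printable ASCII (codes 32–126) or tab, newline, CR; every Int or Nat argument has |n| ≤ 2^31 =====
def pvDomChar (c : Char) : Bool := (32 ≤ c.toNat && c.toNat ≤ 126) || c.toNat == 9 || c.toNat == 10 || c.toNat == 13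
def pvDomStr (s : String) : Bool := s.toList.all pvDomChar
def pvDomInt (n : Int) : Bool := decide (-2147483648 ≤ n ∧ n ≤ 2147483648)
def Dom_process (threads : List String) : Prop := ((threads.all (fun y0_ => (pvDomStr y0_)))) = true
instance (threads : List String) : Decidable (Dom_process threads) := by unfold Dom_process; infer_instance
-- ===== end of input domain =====

-- B replaces A's per-cell fourteen-branch neighbor scan by a staged separable convolution:
-- one pass of cyclic horizontal triple-sums per row, then each count is three stacked
-- triple-sums minus the cell itself (objective: alternative).

-- ===== PORT A =====
-- threads[i][j] == '+' with Python's indexing (negative wraps once; none = IndexError, which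
-- never equals some '+'; inside Pre_ every access A performs is in range).
def pvPlusA (threads : List String) (i j : Int) : Bool :=
  ((PySem.List.pyGet? threads i).bind (fun s => PySem.Str.pyGet? s j)) == some '+'

-- '-' in threads[x][y]: membership in a 1-character string is equality with that character.
def pvMinusA (threads : List String) (i j : Int) : Bool :=
  ((PySem.List.pyGet? threads i).bind (fun s => PySem.Str.pyGet? s j)) == some '-'

-- "neighbors += 1" guarded by an if / if-elif / if-elif-elif-elif chain, as in A
def pvBump (c : Prop) [Decidable c] (t : Int) : Int := if c then t + 1 else t
def pvBump2 (c1 c2 : Prop) [Decidable c1] [Decidable c2] (t : Int) : Int :=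
  if c1 then t + 1 else if c2 then t + 1 else t
def pvBump4 (c1 c2 c3 c4 : Prop) [Decidable c1] [Decidable c2] [Decidable c3] [Decidable c4]
    (t : Int) : Int :=
  if c1 then t + 1 else if c2 then t + 1 else if c3 then t + 1 else if c4 then t + 1 else t

-- A's if/elif neighbor count, branch for branch in A's order (above, left, top-left, below,
-- right, bottom-right, bottom-left, top-right).
def pvNeighborsA (threads : List String) (n m x y : Int) : Int :=
  let neighbors : Int := 0
  let neighbors := pvBump (x < n ∧ pvPlusA threads (x-1) y) neighbors
  let neighbors := pvBump (y < m ∧ pvPlusA threads x (y-1)) neighbors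
  let neighbors := pvBump (x < n ∧ y < m ∧ pvPlusA threads (x-1) (y-1)) neighbors
  let neighbors := pvBump2 (x < n - 1 ∧ pvPlusA threads (x+1) y)
                           (x = n - 1 ∧ pvPlusA threads 0 y) neighbors
  let neighbors := pvBump2 (y < m - 1 ∧ pvPlusA threads x (y+1))
                           (y = m - 1 ∧ pvPlusA threads x 0) neighbors
  let neighbors := pvBump4 (x < n - 1 ∧ y < m - 1 ∧ pvPlusA threads (x+1) (y+1))
                           (x < n - 1 ∧ y = m - 1 ∧ pvPlusA threads (x+1) 0)
                           (x = n - 1 ∧ y < m - 1 ∧ pvPlusA threads 0 (y+1))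
                           (x = n - 1 ∧ y = m - 1 ∧ pvPlusA threads 0 0) neighbors
  let neighbors := pvBump2 (x < n - 1 ∧ y < m ∧ pvPlusA threads (x+1) (y-1))
                           (x = n - 1 ∧ y < m ∧ pvPlusA threads 0 (y-1)) neighbors
  let neighbors := pvBump2 (x < n ∧ y < m - 1 ∧ pvPlusA threads (x-1) (y+1))
                           (x < n ∧ y = m - 1 ∧ pvPlusA threads (x-1) 0) neighbors
  neighbors

-- A's inner loop: row = list(threads[x]); for y in range(len(row)): … row[y] = …
-- (len(row) is constant through the loop: assignment preserves length).
def pvRowA (threads : List String) (x : Int) : List Char :=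
  let row := (PySem.List.pyGetD threads x "").toList
  let n : Int := (threads.length : Int)
  let m : Int := (row.length : Int)
  (PySem.List.pyRange 0 m 1).foldl (fun row y =>
    let neighbors := pvNeighborsA threads n m x y
    if pvPlusA threads x y then
      if neighbors ∈ ([2, 4, 6] : List Int) then PySem.List.pySetD row y '+'
      else PySem.List.pySetD row y '-'
    else if pvMinusA threads x y then
      if neighbors ∈ ([2, 3, 5, 7] : List Int) then PySem.List.pySetD row y '+'
      else PySem.List.pySetD row y '-'
    else row) row

-- newMatrix = deepcopy(threads); newMatrix[x] = ''.join(row)  (join of chars = String.ofList);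
-- then the final loop appending newMatrix[z] for 0 < z < len-1.
def process (threads : List String) : List String :=
  let newMatrix := threads
  let newMatrix := (PySem.List.pyRange 0 (threads.length : Int) 1).foldl
    (fun nm x => PySem.List.pySetD nm x (String.ofList (pvRowA threads x))) newMatrix
  (PySem.List.pyRange 0 (newMatrix.length : Int) 1).foldl
    (fun acc z => if 0 < z ∧ z < (newMatrix.length : Int) - 1
                  then acc ++ [PySem.List.pyGetD newMatrix z ""] else acc) []

-- ===== PORT B =====
-- grid = [[1 if c == '+' else 0 for c in row] for row in threads]
def pvGrid (threads : List String) : List (List Int) :=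
  threads.map (fun row => row.toList.map (fun c => if c = '+' then (1:Int) else 0))

-- horiz: for each bit-row b, the cyclic horizontal triple-sum b[y-1] + b[y] + b[(y+1) % m]
def pvHoriz (grid : List (List Int)) : List (List Int) :=
  grid.map (fun b =>
    (PySem.List.pyRange 0 (b.length : Int) 1).map (fun y =>
      PySem.List.pyGetD b (y - 1) 0 + PySem.List.pyGetD b y 0 +
        PySem.List.pyGetD b (PySem.Int.mod (y + 1) (b.length : Int)) 0))

-- cnt = horiz[x-1][y] + horiz[x][y] + horiz[(x+1) % n][y] - grid[x][y]; then the rule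
def pvCellB (grid horiz : List (List Int)) (n x y : Int) (c : Char) : Char :=
  let cnt := PySem.List.pyGetD (PySem.List.pyGetD horiz (x - 1) []) y 0
           + PySem.List.pyGetD (PySem.List.pyGetD horiz x []) y 0
           + PySem.List.pyGetD (PySem.List.pyGetD horiz (PySem.Int.mod (x + 1) n) []) y 0
           - PySem.List.pyGetD (PySem.List.pyGetD grid x []) y 0
  if c = '+' then (if cnt = 2 ∨ cnt = 4 ∨ cnt = 6 then '+' else '-')
  else if c = '-' then (if cnt = 2 ∨ cnt = 3 ∨ cnt = 5 ∨ cnt = 7 then '+' else '-')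
  else c

-- one output row: ''.join(new)
def pvRowB (threads : List String) (grid horiz : List (List Int)) (n x : Int) : String :=
  let row := PySem.List.pyGetD threads x ""
  String.ofList ((PySem.List.pyRange 0 (row.toList.length : Int) 1).map
    (fun y => pvCellB grid horiz n x y (PySem.List.pyGetD row.toList y ' ')))

def process_alt (threads : List String) : List String :=
  let n : Int := (threads.length : Int)
  let grid := pvGrid threads
  let horiz := pvHoriz grid
  let out := (PySem.List.pyRange 0 n 1).map (fun x => pvRowB threads grid horiz n x)
  PySem.List.slice out (some 1) (some (-1))

-- ===== PRECONDITION & SPEC =====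
-- Pre_ excludes non-rectangular grids: there A's mixed negative-index/wrap reads step outside a
-- shorter row and raise IndexError (exhaustive search up to 3×3 found no jagged input on which A
-- returns), so Pre_ is a pure crash exclusion.
def Pre_process (threads : List String) : Prop :=
  ∀ s ∈ threads, s.toList.length = (threads.headD "").toList.length
instance (threads : List String) : Decidable (Pre_process threads) := by
  unfold Pre_process; infer_instance

def pvWitness_process : List String := ["+-+", "-+-", "++-"]

def Spec_process (threads : List String) (out : List String) : Prop := out = process_alt threads
instance (threads : List String) (out : List String) : Decidable (Spec_process threads out) := by
  unfold Spec_process; infer_instance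

-- ===== CLAIM (what is proved, stated in full; the proofs are below) =====
def Claim_equal_process : Prop := ∀ (threads : List String), Dom_process threads → Pre_process threads → Spec_process threads (process threads)

-- ===== LEMMAS AND PROOFS =====

-- proof-side abbreviations: a single toroidal read, as a Bool and as a 0/1 bit
def pvPlusB (threads : List String) (i j : Int) : Bool :=
  ((PySem.List.pyGet? threads i).bind (fun s => PySem.Str.pyGet? s j)) == some '+'

def pvBit (threads : List String) (i j : Int) : Int :=
  if pvPlusB threads i j then 1 else 0

def pvOffsets : List (Int × Int) :=
  [(-1,-1),(-1,0),(-1,1),(0,-1),(0,1),(1,-1),(1,0),(1,1)]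

-- proof intermediate: the 8-offset toroidal count (the bridge between B's staged sums and A's branches)
def pvCountB (threads : List String) (n m x y : Int) : Int :=
  pvOffsets.foldl (fun cnt d =>
    if pvPlusB threads (PySem.Int.mod (x + d.1) n) (PySem.Int.mod (y + d.2) m) then cnt + 1 else cnt) 0

theorem pv_pyIdx_mod (n : Nat) (i : Int) (h1 : -(n:Int) ≤ i) (h2 : i < (n:Int)) :
    PySem.List.pyIdx? n (PySem.Int.mod i (n:Int)) = PySem.List.pyIdx? n i := by
  have hn : 0 < (n:Int) := by omega
  rw [PySem.Int.mod_eq_emod_of_pos hn]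
  have hmod : i % (n:Int) = if 0 ≤ i then i else i + n := by
    split_ifs with h
    · exact Int.emod_eq_of_lt h h2
    · rw [← Int.add_emod_right]; exact Int.emod_eq_of_lt (by omega) (by omega)
  rw [hmod]
  unfold PySem.List.pyIdx?
  split_ifs <;> (try simp only [Option.some.injEq]) <;> omega

theorem pv_pyGet_mod {α : Type} (xs : List α) (k : Nat) (hk : xs.length = k) (i : Int)
    (h1 : -(k:Int) ≤ i) (h2 : i < (k:Int)) :
    PySem.List.pyGet? xs (PySem.Int.mod i (k:Int)) = PySem.List.pyGet? xs i := by
  subst hk; unfold PySem.List.pyGet?; rw [pv_pyIdx_mod _ _ h1 h2]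

-- the getD form of the same wrap fact (pyGetD is (pyGet? …).getD by definition)
theorem pv_pyGetD_mod {α : Type} (xs : List α) (k : Nat) (hk : xs.length = k) (i : Int) (d : α)
    (h1 : -(k:Int) ≤ i) (h2 : i < (k:Int)) :
    PySem.List.pyGetD xs (PySem.Int.mod i (k:Int)) d = PySem.List.pyGetD xs i d := by
  unfold PySem.List.pyGetD
  rw [pv_pyGet_mod xs k hk i h1 h2]

theorem pv_pyGet_mem {α : Type} {xs : List α} {i : Int} {a : α}
    (h : PySem.List.pyGet? xs i = some a) : a ∈ xs := by
  unfold PySem.List.pyGet? at h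
  cases hidx : PySem.List.pyIdx? xs.length i with
  | none => rw [hidx] at h; simp at h
  | some k => rw [hidx] at h; simp at h; exact List.mem_of_getElem? h

theorem pv_pyGet_pos {α : Type} (xs : List α) (i : Int) (h1 : 0 ≤ i) (h2 : i < (xs.length:Int)) :
    PySem.List.pyGet? xs i = xs[i.toNat]? := by
  unfold PySem.List.pyGet? PySem.List.pyIdx?
  rw [if_pos h1, if_pos h2]; rfl

-- B's modular access equals A's (possibly negative-index) access, for any in-window index pair.
theorem pvPlus_mod (threads : List String) (m : Nat)
    (hm : ∀ s ∈ threads, s.toList.length = m) (i j : Int)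
    (hi1 : -(threads.length:Int) ≤ i) (hi2 : i < (threads.length:Int))
    (hj1 : -(m:Int) ≤ j) (hj2 : j < (m:Int)) :
    pvPlusB threads (PySem.Int.mod i (threads.length:Int)) (PySem.Int.mod j (m:Int))
      = pvPlusA threads i j := by
  unfold pvPlusA pvPlusB
  rw [pv_pyGet_mod threads threads.length rfl i hi1 hi2]
  cases hget : PySem.List.pyGet? threads i with
  | none => rfl
  | some s =>
    have hlen : s.toList.length = m := hm s (pv_pyGet_mem hget)
    simp only [Option.bind_some]
    have hstr : PySem.Str.pyGet? s (PySem.Int.mod j (m:Int)) = PySem.Str.pyGet? s j := by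
      unfold PySem.Str.pyGet? PySem.Chars.pyGet?
      exact pv_pyGet_mod s.toList m hlen j hj1 hj2
    rw [hstr]

theorem pvBump_eq (c : Prop) [Decidable c] (t : Int) :
    pvBump c t = t + (if c then 1 else 0) := by
  unfold pvBump; split_ifs <;> ring

theorem pvBump2_eq (c1 c2 : Prop) [Decidable c1] [Decidable c2] (t : Int) :
    pvBump2 c1 c2 t = t + (if c1 then 1 else if c2 then 1 else 0) := by
  unfold pvBump2; split_ifs <;> ring

theorem pvBump4_eq (c1 c2 c3 c4 : Prop) [Decidable c1] [Decidable c2] [Decidable c3]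
    [Decidable c4] (t : Int) :
    pvBump4 c1 c2 c3 c4 t = t + (if c1 then 1 else if c2 then 1 else if c3 then 1 else if c4 then 1 else 0) := by
  unfold pvBump4; split_ifs <;> ring

set_option maxHeartbeats 1000000 in
theorem pvNeighbors_eq (threads : List String) (m : Nat)
    (hm : ∀ s ∈ threads, s.toList.length = m) (x y : Int)
    (hx1 : 0 ≤ x) (hx2 : x < (threads.length:Int)) (hy1 : 0 ≤ y) (hy2 : y < (m:Int)) :
    pvCountB threads (threads.length:Int) (m:Int) x y
      = pvNeighborsA threads (threads.length:Int) (m:Int) x y := by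
  have hn0 : 0 < (threads.length:Int) := by omega
  have hm0 : 0 < (m:Int) := by omega
  have hA := pvPlus_mod threads m hm
  have hwx : x = (threads.length:Int) - 1 →
      PySem.Int.mod (x+1) (threads.length:Int) = PySem.Int.mod 0 (threads.length:Int) := by
    intro h
    rw [PySem.Int.mod_eq_emod_of_pos hn0, PySem.Int.mod_eq_emod_of_pos hn0]
    have : x + 1 = (threads.length:Int) := by omega
    rw [this, Int.emod_self, Int.zero_emod]
  have hwy : y = (m:Int) - 1 →
      PySem.Int.mod (y+1) (m:Int) = PySem.Int.mod 0 (m:Int) := by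
    intro h
    rw [PySem.Int.mod_eq_emod_of_pos hm0, PySem.Int.mod_eq_emod_of_pos hm0]
    have : y + 1 = (m:Int) := by omega
    rw [this, Int.emod_self, Int.zero_emod]
  have hB : pvCountB threads (threads.length:Int) (m:Int) x y
      = pvOffsets.foldl (fun cnt d => cnt +
          (if pvPlusB threads (PySem.Int.mod (x + d.1) (threads.length:Int))
               (PySem.Int.mod (y + d.2) (m:Int)) then (1:Int) else 0)) 0 := by
    unfold pvCountB; congr 1; funext cnt d; split_ifs <;> ring
  rw [hB]
  simp only [pvOffsets, List.foldl_cons, List.foldl_nil]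
  simp only [pvNeighborsA, pvBump_eq, pvBump2_eq, pvBump4_eq]
  rw [show x + (-1:Int) = x - 1 from by ring, show y + (-1:Int) = y - 1 from by ring,
      show x + (0:Int) = x from by ring, show y + (0:Int) = y from by ring]
  rw [hA (x-1) (y-1) (by omega) (by omega) (by omega) (by omega),
      hA (x-1) y (by omega) (by omega) (by omega) (by omega),
      hA x (y-1) (by omega) (by omega) (by omega) (by omega)]
  by_cases hxe : x = (threads.length:Int) - 1 <;> by_cases hye : y = (m:Int) - 1
  · rw [hwx hxe, hwy hye,
        hA 0 0 (by omega) (by omega) (by omega) (by omega),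
        hA 0 (y-1) (by omega) (by omega) (by omega) (by omega),
        hA (x-1) 0 (by omega) (by omega) (by omega) (by omega),
        hA x 0 (by omega) (by omega) (by omega) (by omega),
        hA 0 y (by omega) (by omega) (by omega) (by omega)]
    have c1 : x < (threads.length:Int) := by omega
    have c2 : ¬ (x < (threads.length:Int) - 1) := by omega
    have c3 : y < (m:Int) := by omega
    have c4 : ¬ (y < (m:Int) - 1) := by omega
    simp only [c1, c2, c3, c4, eq_true hxe, eq_true hye, true_and, false_and, and_false, if_false]
    ring
  · rw [hwx hxe,
        hA 0 (y+1) (by omega) (by omega) (by omega) (by omega),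
        hA 0 (y-1) (by omega) (by omega) (by omega) (by omega),
        hA (x-1) (y+1) (by omega) (by omega) (by omega) (by omega),
        hA x (y+1) (by omega) (by omega) (by omega) (by omega),
        hA 0 y (by omega) (by omega) (by omega) (by omega)]
    have c1 : x < (threads.length:Int) := by omega
    have c2 : ¬ (x < (threads.length:Int) - 1) := by omega
    have c3 : y < (m:Int) := by omega
    have c4 : y < (m:Int) - 1 := by omega
    have c5 : ¬ (y = (m:Int) - 1) := hye
    simp only [c1, c2, c3, c4, c5, eq_true hxe, true_and, false_and, and_false, if_false]
    ring
  · rw [hwy hye,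
        hA (x+1) 0 (by omega) (by omega) (by omega) (by omega),
        hA (x+1) (y-1) (by omega) (by omega) (by omega) (by omega),
        hA (x+1) y (by omega) (by omega) (by omega) (by omega),
        hA (x-1) 0 (by omega) (by omega) (by omega) (by omega),
        hA x 0 (by omega) (by omega) (by omega) (by omega)]
    have c1 : x < (threads.length:Int) := by omega
    have c2 : x < (threads.length:Int) - 1 := by omega
    have c3 : y < (m:Int) := by omega
    have c4 : ¬ (y < (m:Int) - 1) := by omega
    have c5 : ¬ (x = (threads.length:Int) - 1) := hxe
    simp only [c1, c2, c3, c4, c5, eq_true hye, true_and, false_and, and_false, if_false]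
    ring
  · rw [hA (x+1) (y+1) (by omega) (by omega) (by omega) (by omega),
        hA (x+1) (y-1) (by omega) (by omega) (by omega) (by omega),
        hA (x+1) y (by omega) (by omega) (by omega) (by omega),
        hA (x-1) (y+1) (by omega) (by omega) (by omega) (by omega),
        hA x (y+1) (by omega) (by omega) (by omega) (by omega)]
    have c1 : x < (threads.length:Int) := by omega
    have c2 : x < (threads.length:Int) - 1 := by omega
    have c3 : y < (m:Int) := by omega
    have c4 : y < (m:Int) - 1 := by omega
    have c5 : ¬ (x = (threads.length:Int) - 1) := hxe
    have c6 : ¬ (y = (m:Int) - 1) := hye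
    simp only [c1, c2, c3, c4, c5, c6, true_and, false_and, and_false, if_false]
    ring

-- reading grid[x'][j] for in-range nonnegative indices yields the 0/1 bit of the cell
theorem pvBitRead (threads : List String) (m : Nat)
    (hm : ∀ s ∈ threads, s.toList.length = m) (x' j : Int)
    (hx1 : 0 ≤ x') (hx2 : x' < (threads.length:Int)) (hj1 : 0 ≤ j) (hj2 : j < (m:Int)) :
    PySem.List.pyGetD (PySem.List.pyGetD (pvGrid threads) x' []) j 0 = pvBit threads x' j := by
  have hrow : PySem.List.pyGetD (pvGrid threads) x' []
      = (PySem.List.pyGetD threads x' "").toList.map (fun c => if c = '+' then (1:Int) else 0) := by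
    unfold pvGrid
    exact PySem.List.pyGetD_map (fun row : String => row.toList.map (fun c => if c = '+' then (1:Int) else 0)) threads x' ""
  rw [hrow]
  have hmem : PySem.List.pyGetD threads x' "" ∈ threads :=
    PySem.List.pyGetD_mem threads "" (by unfold PySem.Raise.InRange; omega)
  have hlen : (PySem.List.pyGetD threads x' "").toList.length = m := hm _ hmem
  have hmap : PySem.List.pyGetD
      ((PySem.List.pyGetD threads x' "").toList.map (fun c => if c = '+' then (1:Int) else 0)) j 0
      = (fun c => if c = '+' then (1:Int) else 0) (PySem.List.pyGetD (PySem.List.pyGetD threads x' "").toList j '-') :=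
    PySem.List.pyGetD_map (fun c => if c = '+' then (1:Int) else 0) _ j '-'
  rw [hmap]
  dsimp only
  have hget : PySem.List.pyGetD (PySem.List.pyGetD threads x' "").toList j '-'
      = (PySem.List.pyGetD threads x' "").toList[j.toNat] :=
    PySem.List.pyGetD_eq_getElem _ '-' hj1 (by omega)
  rw [hget]
  have hgetx : PySem.List.pyGet? threads x' = some (PySem.List.pyGetD threads x' "") := by
    rw [pv_pyGet_pos threads x' hx1 hx2, List.getElem?_eq_getElem (by omega)]
    rw [PySem.List.pyGetD_eq_getElem threads "" hx1 hx2]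
  have hgety : PySem.Str.pyGet? (PySem.List.pyGetD threads x' "") j
      = some ((PySem.List.pyGetD threads x' "").toList[j.toNat]) := by
    unfold PySem.Str.pyGet? PySem.Chars.pyGet?
    rw [pv_pyGet_pos _ j hj1 (by omega), List.getElem?_eq_getElem (by omega)]
  unfold pvBit pvPlusB
  rw [hgetx]
  simp only [Option.bind_some, hgety]
  by_cases h : (PySem.List.pyGetD threads x' "").toList[j.toNat] = '+' <;> simp [h]

-- reading horiz[x'][y] yields the three cyclic horizontal bits of row x'
theorem pvHorizRead (threads : List String) (m : Nat)
    (hm : ∀ s ∈ threads, s.toList.length = m) (x' y : Int)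
    (hx1 : 0 ≤ x') (hx2 : x' < (threads.length:Int)) (hy1 : 0 ≤ y) (hy2 : y < (m:Int)) :
    PySem.List.pyGetD (PySem.List.pyGetD (pvHoriz (pvGrid threads)) x' []) y 0
      = pvBit threads x' (PySem.Int.mod (y-1) (m:Int)) + pvBit threads x' y
        + pvBit threads x' (PySem.Int.mod (y+1) (m:Int)) := by
  have hm0 : 0 < (m:Int) := by omega
  have hrow : PySem.List.pyGetD (pvHoriz (pvGrid threads)) x' []
      = (fun b : List Int =>
          (PySem.List.pyRange 0 (b.length : Int) 1).map (fun z =>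
            PySem.List.pyGetD b (z - 1) 0 + PySem.List.pyGetD b z 0 +
              PySem.List.pyGetD b (PySem.Int.mod (z + 1) (b.length : Int)) 0))
          (PySem.List.pyGetD (pvGrid threads) x' []) := by
    unfold pvHoriz
    exact PySem.List.pyGetD_map _ (pvGrid threads) x' []
  rw [hrow]
  have hmem : PySem.List.pyGetD threads x' "" ∈ threads :=
    PySem.List.pyGetD_mem threads "" (by unfold PySem.Raise.InRange; omega)
  have hblen : (PySem.List.pyGetD (pvGrid threads) x' []).length = m := by
    have : PySem.List.pyGetD (pvGrid threads) x' []
        = (PySem.List.pyGetD threads x' "").toList.map (fun c => if c = '+' then (1:Int) else 0) := by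
      unfold pvGrid
      exact PySem.List.pyGetD_map (fun row : String => row.toList.map (fun c => if c = '+' then (1:Int) else 0)) threads x' ""
    rw [this, List.length_map]
    exact hm _ hmem
  dsimp only
  rw [hblen]
  rw [PySem.List.pyGetD_map_pyRange_of_nonneg _ (m:Int) y 0 hy1 hy2]
  have h1 : PySem.List.pyGetD (PySem.List.pyGetD (pvGrid threads) x' []) (y-1) 0
      = pvBit threads x' (PySem.Int.mod (y-1) (m:Int)) := by
    rw [← pv_pyGetD_mod (PySem.List.pyGetD (pvGrid threads) x' []) m hblen (y-1) 0 (by omega) (by omega)]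
    exact pvBitRead threads m hm x' _ hx1 hx2 (PySem.Int.mod_nonneg _ hm0) (PySem.Int.mod_lt _ hm0)
  have h2 : PySem.List.pyGetD (PySem.List.pyGetD (pvGrid threads) x' []) y 0
      = pvBit threads x' y := pvBitRead threads m hm x' y hx1 hx2 hy1 hy2
  have h3 : PySem.List.pyGetD (PySem.List.pyGetD (pvGrid threads) x' [])
        (PySem.Int.mod (y+1) (m:Int)) 0
      = pvBit threads x' (PySem.Int.mod (y+1) (m:Int)) :=
    pvBitRead threads m hm x' _ hx1 hx2 (PySem.Int.mod_nonneg _ hm0) (PySem.Int.mod_lt _ hm0)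
  rw [h1, h2, h3]

-- B's staged count (three stacked triple-sums minus the center bit) equals A's branch count
theorem pvCnt_eq (threads : List String) (m : Nat)
    (hm : ∀ s ∈ threads, s.toList.length = m) (x y : Int)
    (hx1 : 0 ≤ x) (hx2 : x < (threads.length:Int)) (hy1 : 0 ≤ y) (hy2 : y < (m:Int)) :
    PySem.List.pyGetD (PySem.List.pyGetD (pvHoriz (pvGrid threads)) (x - 1) []) y 0
      + PySem.List.pyGetD (PySem.List.pyGetD (pvHoriz (pvGrid threads)) x []) y 0
      + PySem.List.pyGetD (PySem.List.pyGetD (pvHoriz (pvGrid threads))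
          (PySem.Int.mod (x + 1) (threads.length:Int)) []) y 0
      - PySem.List.pyGetD (PySem.List.pyGetD (pvGrid threads) x []) y 0
      = pvNeighborsA threads (threads.length:Int) (m:Int) x y := by
  have hn0 : 0 < (threads.length:Int) := by omega
  have hm0 : 0 < (m:Int) := by omega
  have hhl : (pvHoriz (pvGrid threads)).length = threads.length := by
    unfold pvHoriz pvGrid; simp
  have hwrap : PySem.List.pyGetD (pvHoriz (pvGrid threads)) (x - 1) []
      = PySem.List.pyGetD (pvHoriz (pvGrid threads)) (PySem.Int.mod (x-1) (threads.length:Int)) [] := by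
    rw [pv_pyGetD_mod (pvHoriz (pvGrid threads)) threads.length hhl (x-1) [] (by omega) (by omega)]
  rw [hwrap]
  rw [pvHorizRead threads m hm _ y (PySem.Int.mod_nonneg _ hn0) (PySem.Int.mod_lt _ hn0) hy1 hy2,
      pvHorizRead threads m hm x y hx1 hx2 hy1 hy2,
      pvHorizRead threads m hm _ y (PySem.Int.mod_nonneg _ hn0) (PySem.Int.mod_lt _ hn0) hy1 hy2,
      pvBitRead threads m hm x y hx1 hx2 hy1 hy2]
  rw [← pvNeighbors_eq threads m hm x y hx1 hx2 hy1 hy2]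
  have hB : pvCountB threads (threads.length:Int) (m:Int) x y
      = pvOffsets.foldl (fun cnt d => cnt +
          pvBit threads (PySem.Int.mod (x + d.1) (threads.length:Int))
            (PySem.Int.mod (y + d.2) (m:Int))) 0 := by
    unfold pvCountB pvBit; congr 1; funext cnt d; split_ifs <;> ring
  rw [hB]
  simp only [pvOffsets, List.foldl_cons, List.foldl_nil]
  rw [show x + (-1:Int) = x - 1 from by ring, show y + (-1:Int) = y - 1 from by ring,
      show x + (0:Int) = x from by ring, show y + (0:Int) = y from by ring]
  have hmx : PySem.Int.mod x (threads.length:Int) = x := by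
    rw [PySem.Int.mod_eq_emod_of_pos hn0]; exact Int.emod_eq_of_lt hx1 hx2
  have hmy : PySem.Int.mod y (m:Int) = y := by
    rw [PySem.Int.mod_eq_emod_of_pos hm0]; exact Int.emod_eq_of_lt hy1 hy2
  rw [hmx, hmy]
  ring

theorem pvFoldSetAux {α : Type} (d : α) (upd : Int → Option α) (ys : List α) (n : Nat)
    (hn : n ≤ ys.length) :
    (PySem.List.pyRange 0 (n:Int) 1).foldl
      (fun acc y => (upd y).elim acc (fun c => PySem.List.pySetD acc y c)) ys
    = (PySem.List.pyRange 0 (n:Int) 1).map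
        (fun y => (upd y).getD (PySem.List.pyGetD ys y d)) ++ ys.drop n := by
  induction n with
  | zero => simp
  | succ k ih =>
    have hk : k ≤ ys.length := by omega
    have hkl : k < ys.length := by omega
    have hsplit : PySem.List.pyRange 0 ((k+1:Nat):Int) 1
        = PySem.List.pyRange 0 (k:Int) 1 ++ [(k:Int)] := by
      push_cast
      exact PySem.List.pyRange_one_succ_right (by omega)
    rw [hsplit, List.foldl_append, List.map_append, ih hk]
    have hlen : ((PySem.List.pyRange 0 (k:Int) 1).map
        (fun y => (upd y).getD (PySem.List.pyGetD ys y d))).length = k := by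
      simp [PySem.List.length_pyRange_one]
    have hdrop : ys.drop k = ys[k] :: ys.drop (k+1) := List.drop_eq_getElem_cons hkl
    have hget : PySem.List.pyGetD ys (k:Int) d = ys[k] := by
      rw [PySem.List.pyGetD_natCast, List.getD_eq_getElem?_getD, List.getElem?_eq_getElem hkl]
      rfl
    cases hu : upd (k:Int) with
    | none =>
      simp only [List.foldl_cons, List.foldl_nil, List.map_cons, List.map_nil, hu,
                 Option.elim_none, Option.getD_none]
      rw [hdrop, hget]
      simp [List.append_assoc]
    | some c =>
      simp only [List.foldl_cons, List.foldl_nil, List.map_cons, List.map_nil, hu,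
                 Option.elim_some, Option.getD_some]
      rw [PySem.List.pySetD_natCast, hdrop]
      rw [List.set_append_right _ _ (by omega)]
      simp only [hlen, Nat.sub_self, List.set_cons_zero]
      simp [List.append_assoc]

-- folding "set index y to upd y (or leave it)" over all indices = map over the indices
theorem pvFoldSet {α : Type} (d : α) (upd : Int → Option α) (ys : List α) :
    (PySem.List.pyRange 0 (ys.length:Int) 1).foldl
      (fun acc y => (upd y).elim acc (fun c => PySem.List.pySetD acc y c)) ys
    = (PySem.List.pyRange 0 (ys.length:Int) 1).map
        (fun y => (upd y).getD (PySem.List.pyGetD ys y d)) := by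
  have := pvFoldSetAux d upd ys ys.length le_rfl
  simpa using this

theorem pvRow_eq (threads : List String) (m : Nat)
    (hm : ∀ s ∈ threads, s.toList.length = m) (x : Int)
    (hx1 : 0 ≤ x) (hx2 : x < (threads.length:Int)) :
    String.ofList (pvRowA threads x)
      = pvRowB threads (pvGrid threads) (pvHoriz (pvGrid threads)) (threads.length:Int) x := by
  unfold pvRowA pvRowB
  dsimp only
  have hmem : PySem.List.pyGetD threads x "" ∈ threads :=
    PySem.List.pyGetD_mem threads "" (by unfold PySem.Raise.InRange; omega)
  have hmlen : (PySem.List.pyGetD threads x "").toList.length = m :=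
    hm _ hmem
  have hgetx : PySem.List.pyGet? threads x = some (PySem.List.pyGetD threads x "") := by
    rw [pv_pyGet_pos threads x hx1 hx2, List.getElem?_eq_getElem (by omega)]
    rw [PySem.List.pyGetD_eq_getElem threads "" hx1 hx2]
  have hfold := pvFoldSet (' ')
    (fun y => if pvPlusA threads x y then
        some (if pvNeighborsA threads (threads.length:Int) ((PySem.List.pyGetD threads x "").toList.length:Int) x y ∈ ([2, 4, 6] : List Int) then '+' else '-')
      else if pvMinusA threads x y then
        some (if pvNeighborsA threads (threads.length:Int) ((PySem.List.pyGetD threads x "").toList.length:Int) x y ∈ ([2, 3, 5, 7] : List Int) then '+' else '-')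
      else none) (PySem.List.pyGetD threads x "").toList
  have hfun : (fun (row : List Char) (y : Int) =>
      let neighbors := pvNeighborsA threads (threads.length:Int) ((PySem.List.pyGetD threads x "").toList.length:Int) x y
      if pvPlusA threads x y then
        if neighbors ∈ ([2, 4, 6] : List Int) then PySem.List.pySetD row y '+'
        else PySem.List.pySetD row y '-'
      else if pvMinusA threads x y then
        if neighbors ∈ ([2, 3, 5, 7] : List Int) then PySem.List.pySetD row y '+'
        else PySem.List.pySetD row y '-'
      else row)
      = (fun (acc : List Char) (y : Int) =>
        ((if pvPlusA threads x y then
            some (if pvNeighborsA threads (threads.length:Int) ((PySem.List.pyGetD threads x "").toList.length:Int) x y ∈ ([2, 4, 6] : List Int) then '+' else '-')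
          else if pvMinusA threads x y then
            some (if pvNeighborsA threads (threads.length:Int) ((PySem.List.pyGetD threads x "").toList.length:Int) x y ∈ ([2, 3, 5, 7] : List Int) then '+' else '-')
          else none) : Option Char).elim acc (fun c => PySem.List.pySetD acc y c)) := by
    funext acc y
    dsimp only
    split_ifs <;> rfl
  rw [hfun]
  refine congrArg String.ofList (hfold.trans ?_)
  apply List.map_congr_left
  intro y hy
  rw [PySem.List.mem_pyRange_one] at hy
  obtain ⟨hy1, hy2⟩ := hy
  have hm' : ∀ s ∈ threads, s.toList.length = (PySem.List.pyGetD threads x "").toList.length := by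
    intro s hs; rw [hmlen]; exact hm s hs
  have hc : PySem.List.pyGetD (PySem.List.pyGetD threads x "").toList y ' '
      = (PySem.List.pyGetD threads x "").toList[y.toNat] :=
    PySem.List.pyGetD_eq_getElem _ ' ' hy1 hy2
  have hgety : PySem.Str.pyGet? (PySem.List.pyGetD threads x "") y
      = some ((PySem.List.pyGetD threads x "").toList[y.toNat]) := by
    unfold PySem.Str.pyGet? PySem.Chars.pyGet?
    rw [pv_pyGet_pos _ y hy1 hy2, List.getElem?_eq_getElem (by omega)]
  have hplus : pvPlusA threads x y
      = ((PySem.List.pyGetD threads x "").toList[y.toNat] == '+') := by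
    unfold pvPlusA
    rw [hgetx]
    simp only [Option.bind_some, hgety]
    rfl
  have hminus : pvMinusA threads x y
      = ((PySem.List.pyGetD threads x "").toList[y.toNat] == '-') := by
    unfold pvMinusA
    rw [hgetx]
    simp only [Option.bind_some, hgety]
    rfl
  have hcnt := pvCnt_eq threads (PySem.List.pyGetD threads x "").toList.length hm' x y hx1 hx2 hy1 hy2
  unfold pvCellB
  dsimp only
  rw [hc, hcnt, hplus, hminus]
  by_cases h1 : (PySem.List.pyGetD threads x "").toList[y.toNat] = '+'
  · simp [h1]
  · by_cases h2 : (PySem.List.pyGetD threads x "").toList[y.toNat] = '-' <;> simp [h1, h2]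

theorem pvTrim (L : List String) :
    (PySem.List.pyRange 0 (L.length:Int) 1).foldl
      (fun acc z => if 0 < z ∧ z < (L.length:Int) - 1
                    then acc ++ [PySem.List.pyGetD L z ""] else acc) []
    = PySem.List.slice L (some 1) (some (-1)) := by
  have hstep : (fun (acc : List String) (z : Int) =>
      if 0 < z ∧ z < (L.length:Int) - 1 then acc ++ [PySem.List.pyGetD L z ""] else acc)
      = (fun acc z => if (decide (0 < z ∧ z < (L.length:Int) - 1)) = true
                      then acc ++ [PySem.List.pyGetD L z ""] else acc) := by
    funext acc z
    by_cases h : (0 < z ∧ z < (L.length:Int) - 1) <;> simp [h]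
  have hRHS : PySem.List.slice L (some 1) (some (-1)) = (L.drop 1).take (L.length - 2) := by
    simp only [PySem.List.slice, PySem.List.clampIdx_neg_one]
    have hcl : PySem.List.clampIdx L.length 1 = min 1 L.length := by
      unfold PySem.List.clampIdx
      rw [if_neg (by omega)]
      norm_num
    rw [hcl]
    rcases Nat.eq_zero_or_pos L.length with h0 | h1
    · simp [h0]
    · have hmin : min 1 L.length = 1 := by omega
      rw [hmin]
      have h11 : L.length - 1 - 1 = L.length - 2 := by omega
      rw [h11]
  rw [hstep, PySem.List.foldl_append_if, hRHS]
  simp only [List.nil_append]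
  rcases Nat.lt_or_ge L.length 2 with hN | hN
  · have hfilt : List.filter (fun z => decide (0 < z ∧ z < (L.length:Int) - 1))
        (PySem.List.pyRange 0 (L.length:Int) 1) = [] := by
      apply List.filter_eq_nil_iff.mpr
      intro z hz
      rw [PySem.List.mem_pyRange_one] at hz
      simp
      omega
    rw [hfilt]
    have h2 : L.length - 2 = 0 := by omega
    simp [h2]
  · have hsplit1 : PySem.List.pyRange 0 (L.length:Int) 1
        = PySem.List.pyRange 0 1 1 ++ PySem.List.pyRange 1 (L.length:Int) 1 :=
      PySem.List.pyRange_one_append 0 1 (L.length:Int) (by omega) (by omega)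
    have hsplit2 : PySem.List.pyRange 1 (L.length:Int) 1
        = PySem.List.pyRange 1 ((L.length:Int)-1) 1 ++ PySem.List.pyRange ((L.length:Int)-1) (L.length:Int) 1 :=
      PySem.List.pyRange_one_append 1 ((L.length:Int)-1) (L.length:Int) (by omega) (by omega)
    rw [hsplit1, hsplit2, List.filter_append, List.filter_append]
    have hfA : List.filter (fun z => decide (0 < z ∧ z < (L.length:Int) - 1))
        (PySem.List.pyRange 0 1 1) = [] := by
      apply List.filter_eq_nil_iff.mpr
      intro z hz
      rw [PySem.List.mem_pyRange_one] at hz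
      simp
      omega
    have hfC : List.filter (fun z => decide (0 < z ∧ z < (L.length:Int) - 1))
        (PySem.List.pyRange ((L.length:Int)-1) (L.length:Int) 1) = [] := by
      apply List.filter_eq_nil_iff.mpr
      intro z hz
      rw [PySem.List.mem_pyRange_one] at hz
      simp
      omega
    have hfB : List.filter (fun z => decide (0 < z ∧ z < (L.length:Int) - 1))
        (PySem.List.pyRange 1 ((L.length:Int)-1) 1) = PySem.List.pyRange 1 ((L.length:Int)-1) 1 := by
      apply List.filter_eq_self.mpr
      intro z hz
      rw [PySem.List.mem_pyRange_one] at hz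
      simp
      omega
    rw [hfA, hfB, hfC]
    simp only [List.nil_append, List.append_nil]
    have hmapc : (PySem.List.pyRange 1 ((L.length:Int)-1) 1).map (fun z => PySem.List.pyGetD L z "")
        = (PySem.List.pyRange 1 ((L.length:Int)-1) 1).map (fun z => PySem.List.pyGetD L.dropLast z "") := by
      apply List.map_congr_left
      intro z hz
      rw [PySem.List.mem_pyRange_one] at hz
      rw [PySem.List.pyGetD_eq_getElem L "" (by omega) (by omega),
          PySem.List.pyGetD_eq_getElem L.dropLast "" (by omega) (by simp [List.length_dropLast]; omega)]
      rw [List.getElem_dropLast]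
    rw [hmapc]
    have hlen' : ((L.length:Int)-1) = (L.dropLast.length : Int) := by
      simp [List.length_dropLast]
      omega
    rw [hlen', PySem.List.map_pyGetD_pyRange' L.dropLast "" (by omega : (0:Int) ≤ 1)]
    rw [List.dropLast_eq_take, List.drop_take]
    norm_num
    have h11 : L.length - 1 - 1 = L.length - 2 := by omega
    rw [h11]
    omega

-- ===== VERDICT (by name: the statement is the Claim_ definition above) =====
theorem process_spec : Claim_equal_process := by
  intro threads _hdom hpre
  unfold Spec_process process process_alt
  dsimp only
  have hm : ∀ s ∈ threads, s.toList.length = (threads.headD "").toList.length := hpre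
  have hfunO : (fun (nm : List String) (x : Int) =>
      PySem.List.pySetD nm x (String.ofList (pvRowA threads x)))
      = (fun acc x => ((some (String.ofList (pvRowA threads x)) : Option String)).elim acc
          (fun c => PySem.List.pySetD acc x c)) := by
    funext acc x
    rfl
  rw [hfunO, pvFoldSet "" (fun x => some (String.ofList (pvRowA threads x))) threads]
  simp only [Option.getD_some]
  have hmapO : (PySem.List.pyRange 0 (threads.length:Int) 1).map
      (fun x => String.ofList (pvRowA threads x))
      = (PySem.List.pyRange 0 (threads.length:Int) 1).map
        (fun x => pvRowB threads (pvGrid threads) (pvHoriz (pvGrid threads)) (threads.length:Int) x) := by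
    apply List.map_congr_left
    intro x hx
    rw [PySem.List.mem_pyRange_one] at hx
    exact pvRow_eq threads _ hm x hx.1 hx.2
  rw [hmapO]
  exact pvTrim _
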